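/- GENERATED by mk_final_copies.py from the proof of the farm's unit `decode_residue.7a` (farm:decode_residue.7a.1: Lemmas.lean) as the
   re-elaboration sweep compiled it — do not edit. -/
import Asan.CheckWalk
import Vorbis.Spec.Units.decode_residue_7a

open X86 X86.User Asan Vorbis Vorbis.Spec Vorbis.Spec.DecodeResidue

set_option maxRecDepth 4000
set_option maxHeartbeats 4000000

namespace Vorbis.Spec.decode_residue_7a

/-- `imul rax, rax, 0x848 ; add r14, rax` on the zero-extended class book byte is `codebooks + 2120·classbook`. -/
theorem cbk_word (cb k : Nat) (hk : k < 256) (hcb : cb + 2120 * k < 2 ^ 64) :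
    UInt64.ofNat cb + Word.ofBV (BitVec.setWidth 64 (BitVec.zeroExtend 32 (BitVec.ofNat 8 k))) * 2120 =
      UInt64.ofNat (cb + 2120 * k) := by
  have e : Word.ofBV (BitVec.setWidth 64 (BitVec.zeroExtend 32 (BitVec.ofNat 8 k))) = UInt64.ofNat k := by
    apply UInt64.toNat_inj.mp
    unfold Word.ofBV
    simp only [UInt64.toNat_ofBitVec, BitVec.toNat_setWidth, BitVec.truncate_eq_setWidth, BitVec.toNat_ofNat, UInt64.toNat_ofNat']
    omega
  rw [e]
  apply UInt64.toNat_inj.mp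
  u_omega

/-- **Segment 7, part A** (0x10f314 … 0x10f36f; C 2216, 2218 `if (f->valid_bits <= 9) prep_huffman(f)`): the class book's address,
the test of `valid_bits`, the `prep_huffman` arm, up to the check of `f->acc`. -/
theorem seg_a (Lay : Layout) (hLay : Lay.hi = 0x1000000) (μ : Microarch) (hμ : UserX.MicroOK μ) (u₀ : State)
    (hcode : HasCodeNat Lay u₀ Vorbis.L.decode_residue.entry Vorbis.Code.code_decode_residue.nat Vorbis.L.decode_residue.size)
    (h_load8 : Asan.SmallCheck Lay μ Vorbis.WayInv (Vorbis.CodeOK u₀) [.rax, .rcx, .rdx] 8 Vorbis.L.__asan_load8_noabort.entry)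
    (h_load1 : Asan.SmallCheck Lay μ Vorbis.WayInv (Vorbis.CodeOK u₀) [.rax, .rdx] 1 Vorbis.L.__asan_load1_noabort.entry)
    (h_load4 : Asan.SmallCheck Lay μ Vorbis.WayInv (Vorbis.CodeOK u₀) [.rax, .rcx, .rdx] 4 Vorbis.L.__asan_load4_noabort.entry)
    (h_prep : ∀ (others : List Obj) (frames : List (Nat × FrameLayout)) (Blk : Block → Prop) (len : Nat), Calls Lay μ Vorbis.WayInv (Vorbis.conv u₀) Vorbis.L.prep_huffman.entry (Vorbis.Spec.prep_huffman.spec others frames Blk len))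
    (g : G) (hent : Entered u₀ g) (cs pcount : Nat) (v : State) (hat : At17 u₀ g cs pcount v) :
    ReachVia Lay μ WayInv v (fun s => At17Mid1 u₀ g v s) := by
  have he := hent.entry
  v_entry he
  obtain ⟨hrip, hc, hch3, hr12, hloop⟩ := hat
  have hpre := hent.pre
  -- where `*f` is
  have hob : g.Blk (objBlock g.f) := hent.vorbis.obj
  have hobin := hpre.env.ok.inside _ hob
  have hobst := hpre.free.offStack _ hob
  simp only [vblock, voff] at hobin hobst
  have ef : g.f = (g.e.reg .rdi).toNat := rfl
  rw [ef] at hobin hobst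
  have hr : g.e.reg .rdi = addr g.f := eq_addr _ _ rfl
  -- where the record is
  have hbits : Bits g.Blk g.len v.mem g.f := hc.point.vorbis.bits
  have hL : BlkLive g.Blk g.Live' := hc.point.env.live
  have hres : ResidueOK g.Blk v.mem g.f := hc.point.vorbis.residue
  have hrn := hc.rn_lt hent
  have hR2in := hpre.env.ok.inside _ hres.R2
  have hR2st := hpre.free.offStack _ hres.R2
  have hR1 := hres.R1
  have hcfg := hc.config_at
  have hcfg' := hcfg
  unfold stb_vorbis.residue_config_at at hcfg'
  simp only [voff] at hR2in hR2st hcfg'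
  have hrloc : 0x100000 ≤ g.r ∧ g.r + 32 ≤ 0xC00000 ∧ (g.r + 32 ≤ 0x700000 ∨ 0x800000 ≤ g.r) := by
    omega
  clear hR2in hR2st hcfg'
  have hv_rsp : v.reg .rsp = g.e.reg .rsp - 248 := hc.rsp
  have hv_rbp : v.reg .rbp = g.e.reg .rsp - 8 := hc.rbp
  have hv_r12 : v.reg .r12 = UInt64.ofNat g.r := hr12
  have w_rip := hrip
  have w_eq : Mem.EqOn Vorbis.L.textLo Vorbis.L.textHi u₀.mem v.mem := hc.code
  have hdf : v.flags .df = false := (show abiInv _ from hc.inv).1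
  have hmx : v.mxcsr &&& 0x1F80 = 0x1F80 := (show abiInv _ from hc.inv).2
  have hsse := Vorbis.sseOK_of_abiInv hc.inv
  have hprep := h_prep g.others' g.frames' g.Blk g.len
  have hfr_f := hc.fr_f
  -- the class book's address as a number
  have hk : Residue.classbook v.mem g.r < 256 := by
    simp only [vacc, voff]
    exact Mem.u8_lt _ _
  have ecb : Residue.cbk v.mem g.f g.r = stb_vorbis.codebooks v.mem g.f + 2120 * Residue.classbook v.mem g.r := by
    unfold Residue.cbk stb_vorbis.codebooks_at
    simp only [voff]
  have hv : Real.VorbisOK g.len g.Blk v.mem g.f := hc.point.vorbis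
  have hcbin := ((hc.resAt hent).site_cbk hL hv.config.cb0.F2 0 8 (by decide) (by decide) rfl).inside
    hc.point.env.covers
  rw [ecb] at hcbin
  have r168 : v.mem.readLE (g.e.reg .rdi + 168) 8 = stb_vorbis.codebooks v.mem g.f := by
    rw [hr]
    simp only [vfield, vacc, voff]
  have r1768 : v.mem.readLE (g.e.reg .rdi + 1768) 4 = v.mem.u32 (g.f + 1768) := by
    rw [hr]
    simp only [vfield, vacc, voff]
  have r13 : v.mem.readLE (UInt64.ofNat g.r + 13) 1 = Residue.classbook v.mem g.r := by
    show v.mem.readLE (addr g.r + 13) 1 = _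
    simp only [vfield, vacc, voff]
  u_walk hcode [hμ.vendor] until [Vorbis.L.decode_residue.chk43] span [Vorbis.L.textLo, Vorbis.L.textHi] side (v_side)
  case check_10f322 =>
    -- 0x10f322, load8 [f + 168] (`f->codebooks`)
    have hun : ShadowUntouched v.mem s_10f322.mem := by v_untouched
    have hs := hbits.site_field hL 168 8 (by omega) (by omega) rfl
    exact Vorbis.Spec.check_site hc.shadow hun hs (by u_omega)
  case check_10f333 =>
    -- 0x10f333, load1 [r + 13] (`r->classbook`)
    have hun : ShadowUntouched v.mem s_10f333.mem := by v_untouched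
    have hs := hres.site_record hL hrn 13 1 (by decide) (by decide) rfl
    rw [hcfg] at hs
    exact Vorbis.Spec.check_site hc.shadow hun hs (by u_omega)
  case check_10f34f =>
    -- 0x10f34f, load4 [f + 1768] (`f->valid_bits`)
    have hun : ShadowUntouched v.mem s_10f34f.mem := by v_untouched
    have hs := hbits.site_field hL 1768 4 (by omega) (by omega) rfl
    exact Vorbis.Spec.check_site hc.shadow hun hs (by u_omega)
  case call_inv =>
    refine Vorbis.abiInv_of ?_ ?_
    · rw [w_flags]
      simp only [X86.User.df_setStatus]
      exact w_df_10f34f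
    · rw [w_mxcsr]
      exact hmx
  case pre_10f4af =>
    -- prep_huffman's precondition: the shadow clause, the readers' environment, `Bits` after the pushed return address
    have hun : ShadowUntouched v.mem s_10f4af.mem := by v_untouched
    have hrdi : s_10f4af.reg .rdi = g.e.reg .rdi := w_rdi
    have hsame1 : Mem.SameExcept [⟨(g.e.reg .rsp).toNat - 256, (g.e.reg .rsp).toNat - 248⟩] v.mem s_10f4af.mem := by
      u_same
    obtain ⟨hb1, hmu1⟩ := Vorbis.Spec.Reader.reader_of_window hbits hsame1 (by rw [ef]; omega)
    have etop : (s_10f4af.reg .rsp).toNat + 8 = g.RA - 248 := by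
      show _ = (g.e.reg .rsp).toNat - 248
      rw [w_rsp]
      u_omega
    refine ⟨⟨?_, hent.offText'⟩, ?_, ?_⟩
    · rw [etop]
      exact hc.shadow.untouched hun
    · rw [hrdi]
      exact hent.reader'
    · rw [hrdi]
      exact hb1
  · -- after prep_huffman (0x10f4b4): the callee's footprint and post, then `jmp 10f361`
    have w_eq := Vorbis.conv_code_eqOn w_code
    have w_df := (show X86.User.abiInv _ from w_inv).1
    have w_mx := (show X86.User.abiInv _ from w_inv).2
    have w_sse := Vorbis.sseOK_of_abiInv w_inv
    simp only [X86.User.Spec.footprint, vspec, w_rsp_10f4af, w_rdi_10f4af] at w_same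
    have hun1 : ShadowUntouched v.mem s_10f4af.mem := by
      rw [w_mem_10f4af]
      v_untouched
    have hsame1 : Mem.SameExcept [⟨(g.e.reg .rsp).toNat - 256, (g.e.reg .rsp).toNat - 248⟩] v.mem s_10f4af.mem := by
      rw [w_mem_10f4af]
      u_same
    obtain ⟨hb1, hmu1⟩ := Vorbis.Spec.Reader.reader_of_window hbits hsame1 (by rw [ef]; omega)
    have hpost : PrepHuffmanPost g.Blk g.len (s_10f4af.reg .rdi).toNat s_10f4af s_10f4afr := w_post
    rw [w_rdi_10f4af] at hpost
    have hp1 : UInt64.ofNat (s_10f4af.mem.readLE (g.e.reg .rsp - 184) 8) = g.e.reg .rdi := by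
      rw [hsame1.readLE (g.e.reg .rsp - 184) 8 (by u_omega) ?_]
      · exact hfr_f
      · intro w hw
        have e1 : w = ⟨(g.e.reg .rsp).toNat - 256, (g.e.reg .rsp).toNat - 248⟩ := List.mem_singleton.mp hw
        subst e1
        simp only
        u_omega
    have hs1 : UInt64.ofNat (s_10f4afr.mem.readLE (g.e.reg .rsp - 184) 8) = g.e.reg .rdi := by
      u_frame hp1
    clear hp1
    rw [w_mem_10f4af] at w_same
    have hsame : Mem.SameExcept
        [⟨(g.e.reg .rsp).toNat - 848, (g.e.reg .rsp).toNat - 248⟩,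
         ⟨(g.e.reg .rsp).toNat - 192, (g.e.reg .rsp).toNat - 176⟩,
         ⟨(g.e.reg .rsp).toNat - 160, (g.e.reg .rsp).toNat - 156⟩,
         ⟨(g.e.reg .rdi).toNat + 48, (g.e.reg .rdi).toNat + 56⟩, ⟨(g.e.reg .rdi).toNat + 84, (g.e.reg .rdi).toNat + 96⟩,
         ⟨(g.e.reg .rdi).toNat + 136, (g.e.reg .rdi).toNat + 144⟩, ⟨(g.e.reg .rdi).toNat + 1484, (g.e.reg .rdi).toNat + 1749⟩,
         ⟨(g.e.reg .rdi).toNat + 1752, (g.e.reg .rdi).toNat + 1784⟩] v.mem s_10f4afr.mem := by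
      u_same
    have hun : ShadowUntouched v.mem s_10f4afr.mem := Mem.EqOn.trans hun1 hpost.untouched
    have hbr : Bits g.Blk g.len s_10f4afr.mem g.f := hpost.reader.bits
    have hmur : mu s_10f4afr.mem g.f ≤ mu v.mem g.f := by
      have := hpost.reader.mu_le
      rw [ef] at hmu1 ⊢
      omega
    have hrbp : s_10f4afr.reg .rbp = g.e.reg .rsp - 8 := (w_kept.get .rbp rfl).trans hv_rbp
    u_walk hcode [hμ.vendor] until [Vorbis.L.decode_residue.chk43] span [Vorbis.L.textLo, Vorbis.L.textHi] side (v_side)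
    refine ReachVia.done ⟨w_rip, w_rsp, (w_kept.get .rbp rfl).trans hv_rbp, (w_kept.get .r12 rfl).trans hv_r12, w_r13, ?_,
      w_kept.get .r15 rfl, w_rdi, w_eq, ?_, ?_, ?_, ?_, ?_, ?_⟩
    · rw [w_r14, ecb]
      exact cbk_word _ _ hk (by omega)
    · v_inv
    · rw [w_mem]
      exact hs1
    · rw [w_mem]
      exact hsame
    · rw [w_mem]
      exact hun
    · rw [w_mem]
      exact hbr
    · rw [w_mem]
      exact hmur
  · -- the direct path: `valid_bits > 9`; only return addresses of the checks were pushed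
    have hsame1 : Mem.SameExcept [⟨(g.e.reg .rsp).toNat - 256, (g.e.reg .rsp).toNat - 248⟩] v.mem s_10f368.mem := by
      rw [w_mem]
      u_same
    obtain ⟨hb1, hmu1⟩ := Vorbis.Spec.Reader.reader_of_window hbits hsame1 (by rw [ef]; omega)
    have hs1 : UInt64.ofNat (s_10f368.mem.readLE (g.e.reg .rsp - 184) 8) = g.e.reg .rdi := by
      rw [hsame1.readLE (g.e.reg .rsp - 184) 8 (by u_omega) ?_]
      · exact hfr_f
      · intro w hw
        have e1 : w = ⟨(g.e.reg .rsp).toNat - 256, (g.e.reg .rsp).toNat - 248⟩ := List.mem_singleton.mp hw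
        subst e1
        simp only
        u_omega
    refine ReachVia.done ⟨w_rip, w_rsp, (w_kept.get .rbp rfl).trans hv_rbp, (w_kept.get .r12 rfl).trans hv_r12, w_r13, ?_,
      w_kept.get .r15 rfl, w_rdi, w_eq, ?_, hs1, ?_, ?_, hb1, Nat.le_of_eq hmu1⟩
    · rw [w_r14, ecb]
      exact cbk_word _ _ hk (by omega)
    · v_inv
    · rw [w_mem]
      u_same
    · rw [w_mem]
      v_untouched

end Vorbis.Spec.decode_residue_7a
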